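-- pv_equiv track=rewrite | github.com/tomhyhan/PEuler | romn.py | solution
-- ===== SOURCE A (Python) =====
-- from collections import defaultdict
--
-- def solution(arrows):
--     DIRS = [(-1,0),(-1,1),(0,1),(1,1),(1,0),(1,-1),(0,-1),(-1,-1)]
--
--     a_map = defaultdict(set)
--     n_rooms = 0
--     row, col = 0, 0
--
--     for arrow in arrows:
--         for _ in range(2):
--             nrow = row + DIRS[arrow][0]
--             ncol = col + DIRS[arrow][1]
--
--             prev = (row, col)
--             curr = (nrow, ncol)
--             if curr in a_map and prev not in a_map[curr]:
--                 n_rooms += 1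
--             a_map[curr].add(prev)
--             a_map[prev].add(curr)
--
--             row = nrow
--             col = ncol
--
--     return n_rooms
-- ===== SOURCE B (Python) =====
-- def solution(arrows):
--     DIRS = [(-1,0),(-1,1),(0,1),(1,1),(1,0),(1,-1),(0,-1),(-1,-1)]
--     pos = (0, 0)
--     vertices = {pos}
--     edges = set()
--     for arrow in arrows:
--         dr, dc = DIRS[arrow]
--         for _ in range(2):
--             npos = (pos[0] + dr, pos[1] + dc)
--             vertices.add(npos)
--             edges.add((pos, npos) if pos <= npos else (npos, pos))
--             pos = npos
--     # connected trace: cycle count = E - V + 1 (Euler's formula)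
--     return len(edges) - len(vertices) + 1
-- ===== Notes on version B (the rewrite author's own statement) =====
-- stated objective: simpler
-- what changed: Replaces A's incremental cycle detection (a defaultdict adjacency map with a per-step new-edge-to-seen-vertex test) by one pass that collects the sets of visited vertices and distinct undirected edges and returns E - V + 1, Euler's formula for the connected traced path.
import Mathlib
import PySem

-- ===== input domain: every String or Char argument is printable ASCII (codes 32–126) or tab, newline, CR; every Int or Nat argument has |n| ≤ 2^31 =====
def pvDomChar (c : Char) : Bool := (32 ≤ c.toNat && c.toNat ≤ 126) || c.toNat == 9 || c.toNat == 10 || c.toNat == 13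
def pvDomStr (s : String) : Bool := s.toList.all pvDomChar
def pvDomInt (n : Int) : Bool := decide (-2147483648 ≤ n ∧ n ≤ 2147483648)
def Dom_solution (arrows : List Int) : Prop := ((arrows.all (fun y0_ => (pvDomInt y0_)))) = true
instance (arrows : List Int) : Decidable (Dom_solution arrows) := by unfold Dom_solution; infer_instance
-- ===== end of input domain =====

-- B re-implements A's incremental cycle detection by Euler's formula E - V + 1 on the sets of
-- distinct undirected edges and visited vertices of the traced path (simpler, same cost).

-- shared helper: the DIRS table and Python's DIRS[arrow] lookup (negative index wraps;
-- the .getD default is never reached under Pre_solution, which excludes the IndexError inputs)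
def pvDirs : List (Int × Int) :=
  [(-1,0),(-1,1),(0,1),(1,1),(1,0),(1,-1),(0,-1),(-1,-1)]

def pvDir (arrow : Int) : Int × Int := (PySem.List.pyGet? pvDirs arrow).getD (0, 0)

-- ===== PORT A =====
-- state: (a_map, n_rooms, (row, col))
def stepA (arrow : Int)
    (st : PySem.Dict (Int × Int) (PySem.Set (Int × Int)) × Int × (Int × Int)) :
    PySem.Dict (Int × Int) (PySem.Set (Int × Int)) × Int × (Int × Int) :=
  let m := st.1
  let n := st.2.1
  let p := st.2.2
  let d := pvDir arrow
  let c := (p.1 + d.1, p.2 + d.2)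
  let n' := if m.contains c && !(PySem.Set.contains (m.getD c PySem.Set.empty) p) then n + 1 else n
  let m' := (m.modify c PySem.Set.empty (fun s => PySem.Set.add s p)).modify p PySem.Set.empty
              (fun s => PySem.Set.add s c)
  (m', n', c)

def solution (arrows : List Int) : Int :=
  (arrows.foldl (fun st a => stepA a (stepA a st)) (PySem.Dict.empty, 0, (0, 0))).2.1

-- ===== PORT B =====
-- Python tuple comparison (pos <= npos), lexicographic
def pairLe (a b : Int × Int) : Bool :=
  decide (a.1 < b.1) || (decide (a.1 = b.1) && decide (a.2 ≤ b.2))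

-- an undirected edge stored as a sorted tuple
def pvEdge (p c : Int × Int) : (Int × Int) × (Int × Int) :=
  if pairLe p c then (p, c) else (c, p)

-- state: (vertices, edges, pos)
def stepB (arrow : Int)
    (st : PySem.Set (Int × Int) × PySem.Set ((Int × Int) × (Int × Int)) × (Int × Int)) :
    PySem.Set (Int × Int) × PySem.Set ((Int × Int) × (Int × Int)) × (Int × Int) :=
  let vs := st.1
  let es := st.2.1
  let p := st.2.2
  let d := pvDir arrow
  let c := (p.1 + d.1, p.2 + d.2)
  (PySem.Set.add vs c, PySem.Set.add es (pvEdge p c), c)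

def solution_alt (arrows : List Int) : Int :=
  let st := arrows.foldl (fun st a => stepB a (stepB a st))
              (PySem.Set.ofList [((0 : Int), (0 : Int))], PySem.Set.empty, (0, 0))
  (st.2.1.length : Int) - st.1.length + 1

-- ===== PRECONDITION & SPEC =====
-- Pre_ excludes exactly the inputs where A raises IndexError: an arrow outside -8..7 (DIRS[arrow]).
def Pre_solution (arrows : List Int) : Prop := ∀ a ∈ arrows, -8 ≤ a ∧ a < 8
instance (arrows : List Int) : Decidable (Pre_solution arrows) := by unfold Pre_solution; infer_instance

def pvWitness_solution : List Int := [0, 2, 4, 6, -1, 7]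

def Spec_solution (arrows : List Int) (out : Int) : Prop := out = solution_alt arrows
instance (arrows : List Int) (out : Int) : Decidable (Spec_solution arrows out) := by unfold Spec_solution; infer_instance

-- ===== CLAIM (what is proved, stated in full; the proofs are below) =====
def Claim_equal_solution : Prop := ∀ (arrows : List Int), Dom_solution arrows → Pre_solution arrows → Spec_solution arrows (solution arrows)

-- ===== LEMMAS AND PROOFS =====

-- the coupling invariant between A's state and B's state
def CInv (sa : PySem.Dict (Int × Int) (PySem.Set (Int × Int)) × Int × (Int × Int))
    (sb : PySem.Set (Int × Int) × PySem.Set ((Int × Int) × (Int × Int)) × (Int × Int)) : Prop :=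
  sa.2.2 = sb.2.2 ∧
  sa.2.1 = (sb.2.1.length : Int) - sb.1.length + 1 ∧
  (∀ v, v ∈ sb.1 ↔ (sa.1.contains v = true ∨ v = sa.2.2)) ∧
  (∀ u v, v ∈ sa.1.getD u PySem.Set.empty ↔ pvEdge u v ∈ sb.2.1)

lemma pvEdge_symm (u v : Int × Int) : pvEdge u v = pvEdge v u := by
  simp only [pvEdge, pairLe]
  rcases u with ⟨a, b⟩; rcases v with ⟨c, d⟩
  split_ifs with h1 h2 h2 <;> simp_all <;> omega

lemma pvEdge_inj {u v p c : Int × Int} (h : pvEdge u v = pvEdge p c) :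
    (u = p ∧ v = c) ∨ (u = c ∧ v = p) := by
  simp only [pvEdge] at h
  split_ifs at h <;> rcases h with ⟨h1, h2⟩ <;> simp_all

lemma pvDir_ne_zero {arrow : Int} (h1 : -8 ≤ arrow) (h2 : arrow < 8) :
    pvDir arrow ≠ (0, 0) := by
  interval_cases arrow <;> decide

lemma length_add {α : Type} [BEq α] [LawfulBEq α] (s : PySem.Set α) (x : α) :
    ((PySem.Set.add s x).length : Int) = if x ∈ s then (s.length : Int) else s.length + 1 := by
  rw [PySem.Set.add_eq_ite]
  split_ifs <;> simp

lemma step_inv {arrow : Int} (h1 : -8 ≤ arrow) (h2 : arrow < 8)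
    {sa : PySem.Dict (Int × Int) (PySem.Set (Int × Int)) × Int × (Int × Int)}
    {sb : PySem.Set (Int × Int) × PySem.Set ((Int × Int) × (Int × Int)) × (Int × Int)}
    (hinv : CInv sa sb) : CInv (stepA arrow sa) (stepB arrow sb) := by
  obtain ⟨m, n, p⟩ := sa
  obtain ⟨vs, es, q⟩ := sb
  obtain ⟨hpq, hn, hv, he⟩ := hinv
  simp only at hpq hn hv he
  subst hpq
  have hd := pvDir_ne_zero h1 h2
  set d := pvDir arrow with hdef
  set c : Int × Int := (p.1 + d.1, p.2 + d.2) with hc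
  have hcp : c ≠ p := by
    intro h
    apply hd
    rcases d with ⟨d1, d2⟩
    rcases p with ⟨p1, p2⟩
    simp only [hc, Prod.mk.injEq] at h
    simp only [Prod.mk.injEq]
    omega
  have hpc : p ≠ c := fun h => hcp h.symm
  have hcV : c ∈ vs ↔ m.contains c = true := by
    rw [hv c]; simp [hcp]
  have hpE : p ∈ m.getD c PySem.Set.empty ↔ pvEdge p c ∈ es := by
    rw [he c p, pvEdge_symm]
  have hm' : ∀ u, ((m.modify c PySem.Set.empty (fun s => PySem.Set.add s p)).modify p
        PySem.Set.empty (fun s => PySem.Set.add s c)).getD u PySem.Set.empty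
      = if u = p then PySem.Set.add (m.getD p PySem.Set.empty) c
        else if u = c then PySem.Set.add (m.getD c PySem.Set.empty) p
        else m.getD u PySem.Set.empty := by
    intro u
    simp only [PySem.Dict.getD_modify, if_neg hpc]
  refine ⟨rfl, ?_, ?_, ?_⟩
  · -- counts
    show (if m.contains c && !(PySem.Set.contains (m.getD c PySem.Set.empty) p) then n + 1 else n)
        = ((PySem.Set.add es (pvEdge p c)).length : Int) - ((PySem.Set.add vs c).length : Int) + 1
    rw [length_add, length_add]
    by_cases hpm : p ∈ m.getD c PySem.Set.empty
    · have hec : pvEdge p c ∈ es := hpE.mp hpm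
      have hmc : m.contains c = true := by
        by_contra hmc
        rw [PySem.Dict.getD_of_not_contains m PySem.Set.empty (by simpa using hmc)] at hpm
        simp [PySem.Set.empty] at hpm
      have hcv : c ∈ vs := hcV.mpr hmc
      have hA : (m.contains c && !(PySem.Set.contains (m.getD c PySem.Set.empty) p)) = false := by
        rw [hmc, (PySem.Set.contains_iff _ _).mpr hpm]; rfl
      rw [hA, if_pos hec, if_pos hcv]
      simpa using hn
    · have hec : pvEdge p c ∉ es := fun h => hpm (hpE.mpr h)
      have hcont : PySem.Set.contains (m.getD c PySem.Set.empty) p = false := by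
        rw [Bool.eq_false_iff]
        intro h
        exact hpm ((PySem.Set.contains_iff _ _).mp h)
      rw [if_neg hec]
      by_cases hmc : m.contains c = true
      · have hcv : c ∈ vs := hcV.mpr hmc
        have hA : (m.contains c && !(PySem.Set.contains (m.getD c PySem.Set.empty) p)) = true := by
          rw [hmc, hcont]; rfl
        rw [hA, if_pos hcv, if_pos rfl]
        omega
      · have hcv : c ∉ vs := fun h => hmc (hcV.mp h)
        have hA : (m.contains c && !(PySem.Set.contains (m.getD c PySem.Set.empty) p)) = false := by
          rw [Bool.eq_false_iff]
          intro h
          exact hmc (Bool.and_eq_true_iff.mp h).1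
        rw [hA, if_neg hcv, if_neg (by decide : ¬ false = true)]
        omega
  · -- vertices
    intro v
    show v ∈ PySem.Set.add vs c ↔
        (((m.modify c PySem.Set.empty (fun s => PySem.Set.add s p)).modify p PySem.Set.empty
          (fun s => PySem.Set.add s c)).contains v = true ∨ v = c)
    rw [PySem.Set.mem_add, hv v]
    simp only [PySem.Dict.contains_modify, Bool.or_eq_true, beq_iff_eq]
    tauto
  · -- edges
    intro u v
    show v ∈ ((m.modify c PySem.Set.empty (fun s => PySem.Set.add s p)).modify p
        PySem.Set.empty (fun s => PySem.Set.add s c)).getD u PySem.Set.empty ↔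
        pvEdge u v ∈ PySem.Set.add es (pvEdge p c)
    rw [hm' u, PySem.Set.mem_add]
    by_cases hup : u = p
    · rw [if_pos hup, PySem.Set.mem_add, hup, he p v]
      constructor
      · rintro (h | h)
        · exact Or.inl h
        · exact Or.inr (by rw [h])
      · rintro (h | h)
        · exact Or.inl h
        · rcases pvEdge_inj h with ⟨h1, h2⟩ | ⟨h1, h2⟩
          · exact Or.inr h2
          · exact absurd h1.symm hcp
    · by_cases huc : u = c
      · rw [if_neg hup, if_pos huc, PySem.Set.mem_add, huc, he c v]
        constructor
        · rintro (h | h)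
          · exact Or.inl h
          · exact Or.inr (by rw [h, pvEdge_symm])
        · rintro (h | h)
          · exact Or.inl h
          · rcases pvEdge_inj h with ⟨h1, h2⟩ | ⟨h1, h2⟩
            · exact absurd h1 (huc ▸ hup)
            · exact Or.inr h2
      · rw [if_neg hup, if_neg huc, he u v]
        constructor
        · exact Or.inl
        · rintro (h | h)
          · exact h
          · rcases pvEdge_inj h with ⟨h1, h2⟩ | ⟨h1, h2⟩
            · exact absurd h1 hup
            · exact absurd h1 huc

lemma foldl_inv (arrows : List Int) (hp : ∀ a ∈ arrows, -8 ≤ a ∧ a < 8)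
    (sa : PySem.Dict (Int × Int) (PySem.Set (Int × Int)) × Int × (Int × Int))
    (sb : PySem.Set (Int × Int) × PySem.Set ((Int × Int) × (Int × Int)) × (Int × Int))
    (hinv : CInv sa sb) :
    CInv (arrows.foldl (fun st a => stepA a (stepA a st)) sa)
        (arrows.foldl (fun st a => stepB a (stepB a st)) sb) := by
  induction arrows generalizing sa sb with
  | nil => exact hinv
  | cons a rest ih =>
    have ha := hp a (by simp)
    exact ih (fun x hx => hp x (by simp [hx]))
      _ _ (step_inv ha.1 ha.2 (step_inv ha.1 ha.2 hinv))

-- ===== VERDICT (by name: the statement is the Claim_ definition above) =====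
theorem solution_spec : Claim_equal_solution := by
  intro arrows _ hpre
  show solution arrows = solution_alt arrows
  have hinv0 : CInv (PySem.Dict.empty, 0, ((0 : Int), (0 : Int)))
      (PySem.Set.ofList [((0 : Int), (0 : Int))], PySem.Set.empty, ((0 : Int), (0 : Int))) := by
    refine ⟨rfl, by decide, ?_, ?_⟩
    · intro v
      constructor
      · intro hmem
        right
        simpa [PySem.Set.ofList] using hmem
      · rintro (h | h)
        · simp [PySem.Dict.contains_empty] at h
        · rw [PySem.Set.mem_ofList]
          simp [h]
    · intro u v
      simp [PySem.Dict.getD_empty]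
  have h := foldl_inv arrows hpre _ _ hinv0
  simp only [solution, solution_alt]
  exact h.2.1
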